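-- pv_equiv track=rewrite | github.com/tamasarker1434/ProcessMining | Assignments/MyDraft.py | get_value_k
-- ===== SOURCE A (Python) =====
-- def get_value_k(log):
--     traces = set()
--     trace_with_n = {}
--     for case_id, events in log.items():
--         trace = []
--         for event in events:
--             if 'concept:name' in event:
--                 trace.append(event['concept:name'])
--         traces.add(tuple(trace))
--
--     for trace in traces:
--         n = 0
--         for case_id, events in log.items():
--             trace_case = [event['concept:name'] for event in events if 'concept:name' in event]
--             if tuple(trace_case) == trace:
--                 n += 1
--         trace_with_n[trace] = n
--
--     return trace_with_n, traces
-- ===== SOURCE B (Python) =====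
-- def get_value_k(log):
--     # One pass: build the count dict directly, then the trace set is its key set.
--     trace_with_n = {}
--     for events in log.values():
--         trace = tuple(e['concept:name'] for e in events if 'concept:name' in e)
--         trace_with_n[trace] = trace_with_n.get(trace, 0) + 1
--     return trace_with_n, set(trace_with_n)
-- ===== Notes on version B (the rewrite author's own statement) =====
-- stated objective: simpler
-- what changed: Replaces A's two-phase distinct-then-rescan counting (for every distinct trace, rescan the whole log and recompute every case's trace) with a single pass that builds the count dictionary incrementally and takes the trace set from its keys.
import Mathlib
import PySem

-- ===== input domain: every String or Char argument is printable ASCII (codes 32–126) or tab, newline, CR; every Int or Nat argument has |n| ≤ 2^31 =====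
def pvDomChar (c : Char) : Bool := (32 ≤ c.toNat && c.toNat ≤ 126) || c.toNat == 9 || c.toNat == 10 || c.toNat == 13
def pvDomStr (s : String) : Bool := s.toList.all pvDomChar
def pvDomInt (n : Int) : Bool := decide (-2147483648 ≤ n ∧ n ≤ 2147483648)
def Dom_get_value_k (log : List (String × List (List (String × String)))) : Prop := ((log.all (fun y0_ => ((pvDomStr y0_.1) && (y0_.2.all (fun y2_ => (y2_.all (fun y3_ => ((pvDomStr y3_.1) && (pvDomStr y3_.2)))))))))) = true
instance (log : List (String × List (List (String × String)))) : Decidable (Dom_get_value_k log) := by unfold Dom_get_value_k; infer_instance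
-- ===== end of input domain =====

-- B replaces A's distinct-then-rescan counting with a single pass building the count dict; trace set = its keys.


-- shared helper: "'concept:name' in event" / "event['concept:name']" on the event dict (first match)
def conceptName? (ev : List (String × String)) : Option String :=
  (PySem.Dict.mk ev).get? "concept:name"

-- ===== PORT A =====
def get_value_k (log : List (String × List (List (String × String)))) :
    (List (List String × Int)) × List (List String) :=
  -- traces = set(); for case_id, events in log.items(): trace = []; … ; traces.add(tuple(trace))
  let traces : PySem.Set (List String) :=
    log.foldl (fun s c =>
      let trace := c.2.foldl (fun tr ev =>
        match conceptName? ev with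
        | some v => tr ++ [v]
        | none => tr) ([] : List String)
      PySem.Set.add s trace) PySem.Set.empty
  -- for trace in traces: n = 0; for case_id, events in log.items(): … ; trace_with_n[trace] = n
  let trace_with_n : PySem.Dict (List String) Int :=
    traces.foldl (fun d trace =>
      let n := log.foldl (fun n c =>
        let trace_case := c.2.filterMap conceptName?
        if trace_case == trace then n + 1 else n) (0 : Int)
      d.insert trace n) PySem.Dict.empty
  (trace_with_n.items, traces)

-- ===== PORT B =====
def get_value_k_alt (log : List (String × List (List (String × String)))) :
    (List (List String × Int)) × List (List String) :=
  -- for events in log.values(): trace = tuple(…); trace_with_n[trace] = trace_with_n.get(trace, 0) + 1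
  let trace_with_n : PySem.Dict (List String) Int :=
    log.foldl (fun d c =>
      let trace := c.2.filterMap conceptName?
      d.insert trace (d.getD trace 0 + 1)) PySem.Dict.empty
  (trace_with_n.items, PySem.Set.ofList trace_with_n.keys)

-- ===== PRECONDITION & SPEC =====
def Spec_get_value_k (log : List (String × List (List (String × String)))) (out : (List (List String × Int)) × List (List String)) : Prop := out = get_value_k_alt log
instance (log : List (String × List (List (String × String)))) (out : (List (List String × Int)) × List (List String)) : Decidable (Spec_get_value_k log out) := by unfold Spec_get_value_k; infer_instance

-- ===== CLAIM (what is proved, stated in full; the proofs are below) =====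
def Claim_equal_get_value_k : Prop := ∀ (log : List (String × List (List (String × String)))), Dom_get_value_k log → Spec_get_value_k log (get_value_k log)

-- ===== LEMMAS AND PROOFS =====

-- A's inner append loop computes the same trace as the comprehension
theorem trace_loop_eq (events : List (List (String × String))) (acc : List String) :
    events.foldl (fun tr ev =>
      match conceptName? ev with
      | some v => tr ++ [v]
      | none => tr) acc = acc ++ events.filterMap conceptName? := by
  induction events generalizing acc with
  | nil => simp
  | cons e t ih =>
    cases h : conceptName? e <;> simp [List.foldl_cons, h, ih]

theorem get_value_k_spec_aux (log : List (String × List (List (String × String)))) :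
    get_value_k log = get_value_k_alt log := by
  simp only [get_value_k, get_value_k_alt, trace_loop_eq, List.nil_append]
  have hA1 : log.foldl (fun s c => PySem.Set.add s (c.2.filterMap conceptName?)) PySem.Set.empty
      = PySem.Set.ofList (log.map (fun c => c.2.filterMap conceptName?)) := by
    rw [PySem.Set.ofList_eq_foldl, List.foldl_map]
    rfl
  have hB : log.foldl (fun d c => d.insert (c.2.filterMap conceptName?)
        (d.getD (c.2.filterMap conceptName?) 0 + 1)) PySem.Dict.empty
      = PySem.Dict.counter (log.map (fun c => c.2.filterMap conceptName?)) := by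
    rw [← PySem.Dict.foldl_insert_getD_add_one_eq_counter, List.foldl_map]
  have hcnt : ∀ t : List String,
      log.foldl (fun n c => if (c.2.filterMap conceptName?) == t then n + 1 else n) (0 : Int)
      = ((log.map (fun c => c.2.filterMap conceptName?)).count t : Int) := by
    intro t
    rw [← List.foldl_map (f := fun c : String × List (List (String × String)) => c.2.filterMap conceptName?)
        (g := fun n tc => if tc == t then n + 1 else n)]
    rw [PySem.List.foldl_beq_add_one]
    omega
  rw [hA1, hB]
  simp only [hcnt]
  have hfresh := PySem.Dict.items_foldl_insert_fresh
    (l := PySem.Set.ofList (log.map (fun c => c.2.filterMap conceptName?)))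
    (k := fun t => t)
    (v := fun t => ((log.map (fun c => c.2.filterMap conceptName?)).count t : Int))
    (d := PySem.Dict.empty)
    (by simp [PySem.Dict.contains_empty])
    (by simp only [List.map_id']; exact PySem.Set.nodup_ofList (log.map (fun c => c.2.filterMap conceptName?)))
  simp only [hfresh, PySem.Dict.items_counter, PySem.Dict.keys_counter,
    PySem.Set.ofList_ofList]
  simp [PySem.Dict.empty]

-- ===== VERDICT (by name: the statement is the Claim_ definition above) =====
theorem get_value_k_spec : Claim_equal_get_value_k := by
  intro log _
  unfold Spec_get_value_k
  exact get_value_k_spec_aux log
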